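-- pv_equiv track=rewrite | github.com/MatheusPercine/TEP | lista1/G/g3.py | max_removed_chars
-- ===== SOURCE A (Python) =====
-- def max_removed_chars(s):
--     n = len(s)
--     # Contar totais de 0s e 1s na string
--     total_0 = s.count('0')
--     total_1 = s.count('1')
--
--     # Inicializar o máximo removido
--     max_removed = 0
--
--     # Contadores acumulados
--     count_0 = 0
--     count_1 = 0
--
--     for i in range(n):
--         if s[i] == '0':
--             count_0 += 1
--         else:
--             count_1 += 1
--
--         # Remover '0's se houver menos '0's do que '1's
--         if count_0 < count_1:
--             max_removed = max(max_removed, count_0)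
--         # Remover '1's se houver menos '1's do que '0's
--         elif count_1 < count_0:
--             max_removed = max(max_removed, count_1)
--
--     return max_removed
-- ===== SOURCE B (Python) =====
-- def max_removed_chars(s):
--     # Closed form: min(prefix zero/one counts) is nondecreasing, so A's maximum is
--     # attained at the last prefix whose counts differ: the whole string if it is
--     # imbalanced, else the prefix of length n-1 (whose minority count is n//2 - 1).
--     n = len(s)
--     zeros = s.count('0')
--     others = n - zeros
--     if zeros != others:
--         return min(zeros, others)
--     return max(n // 2 - 1, 0)
-- ===== Notes on version B (the rewrite author's own statement) =====
-- stated objective: faster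
-- what changed: B replaces A's per-index scan with running counters and a max-update by a closed form computed from the totals alone: one s.count('0') call plus O(1) arithmetic (min(zeros,others) if imbalanced, max(n//2-1,0) if balanced), justified by monotonicity of the prefix minority count.
import Mathlib
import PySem

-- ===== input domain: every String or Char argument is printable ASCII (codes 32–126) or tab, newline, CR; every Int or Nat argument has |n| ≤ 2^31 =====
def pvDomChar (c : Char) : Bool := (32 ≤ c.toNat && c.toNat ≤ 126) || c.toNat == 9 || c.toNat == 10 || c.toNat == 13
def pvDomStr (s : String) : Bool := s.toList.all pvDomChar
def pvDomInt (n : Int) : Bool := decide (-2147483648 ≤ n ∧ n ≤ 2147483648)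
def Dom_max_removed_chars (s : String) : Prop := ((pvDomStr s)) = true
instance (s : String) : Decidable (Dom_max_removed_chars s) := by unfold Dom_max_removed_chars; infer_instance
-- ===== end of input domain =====

-- B replaces A's whole per-index scan by a closed form computed from the totals alone
-- (min of counts if imbalanced, max(n//2 - 1, 0) if balanced); objective: faster constant factor.

-- ===== PORT A =====
-- A's loop over range(n): state (count_0, count_1, max_removed)
def maxRCLoopA : List Char → Int → Int → Int → Int
  | [], _, _, m => m
  | c :: cs, c0, c1, m =>
    if c = '0' then
      let c0' := c0 + 1
      maxRCLoopA cs c0' c1 (if c0' < c1 then max m c0' else if c1 < c0' then max m c1 else m)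
    else
      let c1' := c1 + 1
      maxRCLoopA cs c0 c1' (if c0 < c1' then max m c0 else if c1' < c0 then max m c1' else m)

def max_removed_chars (s : String) : Int :=
  -- n, total_0, total_1 are computed in A but never used afterwards
  let _n := PySem.Str.len s
  let _total0 := PySem.Str.count s "0"
  let _total1 := PySem.Str.count s "1"
  maxRCLoopA s.toList 0 0 0

-- ===== PORT B =====
def max_removed_chars_alt (s : String) : Int :=
  let n := PySem.Str.len s
  let zeros : Int := PySem.Str.count s "0"
  let others := n - zeros
  if zeros ≠ others then min zeros others
  else max (PySem.Int.floordiv n 2 - 1) 0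

-- ===== PRECONDITION & SPEC =====
def Spec_max_removed_chars (s : String) (out : Int) : Prop := out = max_removed_chars_alt s
instance (s : String) (out : Int) : Decidable (Spec_max_removed_chars s out) := by unfold Spec_max_removed_chars; infer_instance

-- ===== CLAIM (what is proved, stated in full; the proofs are below) =====
def Claim_equal_max_removed_chars : Prop := ∀ (s : String), Dom_max_removed_chars s → Spec_max_removed_chars s (max_removed_chars s)

-- ===== LEMMAS AND PROOFS =====

-- Python s.count('0') (non-overlapping substring count) equals the char count for a 1-char needle.
lemma countGo_single (l : List Char) : ∀ (fuel acc : Nat), l.length ≤ fuel →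
    PySem.Chars.count.go ['0'] fuel l acc = acc + l.count '0' := by
  induction l with
  | nil => intro fuel acc _; cases fuel <;> simp [PySem.Chars.count.go]
  | cons c cs ih =>
    intro fuel acc hf
    cases fuel with
    | zero => simp at hf
    | succ f =>
      simp only [PySem.Chars.count.go, List.isPrefixOf, List.count_cons]
      by_cases hc : c = '0'
      · simp only [hc]
        rw [if_pos (by simp)]
        simp only [List.length_singleton, List.drop_succ_cons, List.drop_zero]
        rw [ih f (acc + 1) (by simpa using Nat.le_of_succ_le_succ hf)]
        simp
        omega
      · rw [if_neg (by simp [Ne.symm hc])]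
        rw [ih f acc (by simpa using Nat.le_of_succ_le_succ hf)]
        simp [hc]

lemma strCount_zero (s : String) : (PySem.Str.count s "0" : Int) = (s.toList.count '0' : Int) := by
  have : PySem.Chars.count s.toList ['0'] = s.toList.count '0' := by
    unfold PySem.Chars.count
    rw [if_neg (by simp)]
    simpa using countGo_single s.toList s.toList.length 0 le_rfl
  simp [PySem.Str.count_eq]
  norm_num [this]

-- Closed form of A's loop: with the invariant that m is the minority count at the last
-- imbalanced prefix (or max(c0-1,0) when currently balanced), the final answer depends
-- only on the totals.
lemma loopA_closed (cs : List Char) : ∀ (c0 c1 m : Int), 0 ≤ c0 → 0 ≤ c1 →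
    ((c0 = c1 → m = max (c0 - 1) 0) ∧ (c0 ≠ c1 → m = min c0 c1)) →
    maxRCLoopA cs c0 c1 m =
      (if c0 + (cs.count '0' : Int) = c1 + ((cs.length : Int) - (cs.count '0' : Int))
       then max (c0 + (cs.count '0' : Int) - 1) 0
       else min (c0 + (cs.count '0' : Int)) (c1 + ((cs.length : Int) - (cs.count '0' : Int)))) := by
  induction cs with
  | nil =>
    intro c0 c1 m _ _ hinv
    simp only [maxRCLoopA, List.count_nil, List.length_nil]
    rcases hinv with ⟨h1, h2⟩
    by_cases h : c0 = c1
    · simp [h, h1 h]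
    · simp only [Int.natCast_zero]
      rw [if_neg (by omega)]
      simpa using h2 h
  | cons c cs ih =>
    intro c0 c1 m hc0 hc1 hinv
    simp only [maxRCLoopA]
    by_cases hc : c = '0'
    · rw [if_pos hc]
      rw [ih (c0 + 1) c1 _ (by omega) hc1 (by constructor <;> intro h <;> split_ifs <;> omega)]
      simp only [hc, List.count_cons_self, List.length_cons]
      push_cast
      split_ifs <;> omega
    · rw [if_neg hc]
      rw [ih c0 (c1 + 1) _ hc0 (by omega) (by constructor <;> intro h <;> split_ifs <;> omega)]
      simp only [List.count_cons, beq_iff_eq, hc, if_false, List.length_cons]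
      push_cast
      split_ifs <;> omega

-- ===== VERDICT (by name: the statement is the Claim_ definition above) =====
theorem max_removed_chars_spec : Claim_equal_max_removed_chars := by
  intro s _
  unfold Spec_max_removed_chars max_removed_chars max_removed_chars_alt
  have hcount := strCount_zero s
  have hlen : PySem.Str.len s = (s.toList.length : Int) := by
    simp [PySem.Str.len_eq]
  have hle : s.toList.count '0' ≤ s.toList.length := List.count_le_length
  rw [loopA_closed s.toList 0 0 0 le_rfl le_rfl (by constructor <;> intro h <;> omega)]
  simp only [hcount, hlen, zero_add]
  by_cases hb : (s.toList.count '0' : Int) = (s.toList.length : Int) - (s.toList.count '0' : Int)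
  · rw [if_pos hb, if_neg (by omega)]
    have h2 : PySem.Int.floordiv (s.toList.length : Int) 2 = (s.toList.count '0' : Int) := by
      rw [PySem.Int.floordiv_eq_ediv_of_pos] <;> omega
    rw [h2]
  · rw [if_neg hb, if_pos (by omega)]
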